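-- pv_equiv track=rewrite | github.com/DaanJansen94/lassa_partitioner | lassa_partitioner/core.py | create_initial_apobec_partition
-- ===== SOURCE A (Python) =====
-- def create_initial_apobec_partition(sequences):
--     """Create initial APOBEC3 partition by masking non-APOBEC motifs."""
--     apobec_partition = []
--
--     for seq in sequences:
--         apobec_seq = list('N' * len(seq))
--         for i in range(len(seq) - 1):
--             if seq[i:i+2] == 'GA':
--                 apobec_seq[i] = 'G'
--                 apobec_seq[i+1] = 'A'
--             elif seq[i:i+2] == 'TC':
--                 apobec_seq[i] = 'T'
--                 apobec_seq[i+1] = 'C'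
--         apobec_partition.append(''.join(apobec_seq))
--
--     return apobec_partition
-- ===== SOURCE B (Python) =====
-- import re
--
-- def create_initial_apobec_partition(sequences):
--     """Create initial APOBEC3 partition by masking non-APOBEC motifs."""
--     apobec_partition = []
--     for seq in sequences:
--         masked = ['N'] * len(seq)
--         for m in re.finditer('GA|TC', seq):
--             i = m.start()
--             masked[i] = seq[i]
--             masked[i + 1] = seq[i + 1]
--         apobec_partition.append(''.join(masked))
--     return apobec_partition
-- ===== Notes on version B (the rewrite author's own statement) =====
-- stated objective: idiomatic
-- what changed: A tests every index with an if/elif on 2-char slices and patches literal motif letters into the mask; B finds the (provably non-overlapping) GA/TC motif occurrences with re.finditer and unmasks exactly the matched positions from the sequence itself.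
import Mathlib
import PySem

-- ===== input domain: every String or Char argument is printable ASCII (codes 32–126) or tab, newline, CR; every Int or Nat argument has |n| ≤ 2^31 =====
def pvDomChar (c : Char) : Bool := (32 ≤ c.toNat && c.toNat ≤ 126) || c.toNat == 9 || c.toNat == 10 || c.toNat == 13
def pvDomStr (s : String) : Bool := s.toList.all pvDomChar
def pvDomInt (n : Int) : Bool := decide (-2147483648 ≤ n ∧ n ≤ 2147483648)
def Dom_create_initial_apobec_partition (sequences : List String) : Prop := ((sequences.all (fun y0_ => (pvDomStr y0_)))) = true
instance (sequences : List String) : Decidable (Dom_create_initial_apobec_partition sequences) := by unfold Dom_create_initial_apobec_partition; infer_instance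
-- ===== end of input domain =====

-- B replaces A's per-index if/elif scan by a regex-style motif search (re.finditer('GA|TC')):
-- find the non-overlapping motif occurrences, then unmask exactly those positions (objective: idiomatic).

-- ===== PORT A =====
-- per-sequence body of A's outer loop: 'N'-list, then for i in range(len(seq)-1) the if/elif on seq[i:i+2]
-- (indices i, i+1 are nonnegative and in range whenever a branch fires, so list assignment is pySetD, exact here)
def pvMaskA (seq : String) : String :=
  let cs := seq.toList
  let init : List Char := List.replicate cs.length 'N'
  let res := (PySem.List.pyRange 0 ((cs.length : Int) - 1) 1).foldl
    (fun (ap : List Char) (i : Int) =>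
      if PySem.List.slice cs (some i) (some (i + 2)) = ['G', 'A'] then
        PySem.List.pySetD (PySem.List.pySetD ap i 'G') (i + 1) 'A'
      else if PySem.List.slice cs (some i) (some (i + 2)) = ['T', 'C'] then
        PySem.List.pySetD (PySem.List.pySetD ap i 'T') (i + 1) 'C'
      else ap) init
  String.ofList res

def create_initial_apobec_partition (sequences : List String) : List String :=
  sequences.foldl (fun acc seq => acc ++ [pvMaskA seq]) []

-- ===== PORT B =====
-- re.finditer('GA|TC', seq): left-to-right scan, skipping past each (non-overlapping) match;
-- returns the match start positions (exact: GA/TC matches cannot overlap)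
def pvFindGATC : List Char → Nat → List Nat
  | x :: y :: rest, i =>
    if (x = 'G' ∧ y = 'A') ∨ (x = 'T' ∧ y = 'C') then i :: pvFindGATC rest (i + 2)
    else pvFindGATC (y :: rest) (i + 1)
  | _, _ => []

-- per-sequence body of B: masked = ['N']*len(seq); for each match start i: masked[i]=seq[i]; masked[i+1]=seq[i+1]
def pvMaskB (seq : String) : String :=
  let cs := seq.toList
  let masked := (pvFindGATC cs 0).foldl
    (fun (m : List Char) (i : Nat) => (m.set i (cs.getD i 'N')).set (i + 1) (cs.getD (i + 1) 'N'))
    (List.replicate cs.length 'N')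
  String.ofList masked

def create_initial_apobec_partition_alt (sequences : List String) : List String :=
  sequences.map pvMaskB

-- ===== PRECONDITION & SPEC =====
def Spec_create_initial_apobec_partition (sequences : List String) (out : List String) : Prop := out = create_initial_apobec_partition_alt sequences
instance (sequences : List String) (out : List String) : Decidable (Spec_create_initial_apobec_partition sequences out) := by unfold Spec_create_initial_apobec_partition; infer_instance

-- ===== CLAIM (what is proved, stated in full; the proofs are below) =====
def Claim_equal_create_initial_apobec_partition : Prop := ∀ (sequences : List String), Dom_create_initial_apobec_partition sequences → Spec_create_initial_apobec_partition sequences (create_initial_apobec_partition sequences)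

-- ===== LEMMAS AND PROOFS =====

-- 'there is a GA/TC motif starting at position j'
def pvMot (cs : List Char) (j : Nat) : Bool :=
  decide (cs[j]? = some 'G' ∧ cs[j + 1]? = some 'A') || decide (cs[j]? = some 'T' ∧ cs[j + 1]? = some 'C')

-- position j is unmasked after A's loop has processed indices 0..m-1
def pvKeepUpto (cs : List Char) (m j : Nat) : Bool :=
  (pvMot cs j && decide (j < m)) || (decide (0 < j) && pvMot cs (j - 1) && decide (j - 1 < m))

def pvSpecF (cs : List Char) (m : Nat) : List Char :=
  (List.range cs.length).map (fun j => if pvKeepUpto cs m j then cs.getD j 'N' else 'N')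

-- position j is unmasked in the final result
def pvKeep (cs : List Char) (j : Nat) : Bool :=
  pvMot cs j || (decide (0 < j) && pvMot cs (j - 1))

def pvSpecG (cs : List Char) : List Char :=
  (List.range cs.length).map (fun j => if pvKeep cs j then cs.getD j 'N' else 'N')

lemma pvMot_lt {cs : List Char} {j : Nat} (h : pvMot cs j = true) : j + 1 < cs.length := by
  simp only [pvMot, Bool.or_eq_true, decide_eq_true_eq] at h
  rcases h with ⟨_, h2⟩ | ⟨_, h2⟩ <;>
    exact (List.getElem?_eq_some_iff.mp h2).1

lemma pv_slice_two (cs : List Char) (m : Nat) (a b : Char) :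
    (PySem.List.slice cs (some (m : Int)) (some ((m : Int) + 2)) = [a, b]) ↔
      (cs[m]? = some a ∧ cs[m + 1]? = some b) := by
  have h2 : ((m : Int) + 2) = ((m + 2 : Nat) : Int) := by push_cast; ring
  rw [h2, PySem.List.slice_natCast]
  have ht : m + 2 - m = 2 := by omega
  rw [ht]
  have hd : ∀ k : Nat, (cs.drop m)[k]? = cs[m + k]? := fun k => by rw [List.getElem?_drop]
  match hl : cs.drop m with
  | [] =>
    have h0 := hd 0; rw [hl] at h0
    simp only [List.getElem?_nil, Nat.add_zero] at h0
    constructor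
    · intro hc; simp at hc
    · rintro ⟨hc, -⟩; rw [← h0] at hc; cases hc
  | [x] =>
    have h1 := hd 1; rw [hl] at h1
    simp only [List.getElem?_cons_succ, List.getElem?_nil] at h1
    constructor
    · intro hc; simp [List.take] at hc
    · rintro ⟨-, hc⟩; rw [← h1] at hc; cases hc
  | x :: y :: t =>
    have h0 := hd 0; have h1 := hd 1; rw [hl] at h0 h1
    simp only [List.getElem?_cons_succ, List.getElem?_cons_zero, Nat.add_zero] at h0 h1
    rw [← h0, ← h1]
    simp [List.take]

-- getElem? of pvSpecF
lemma pvSpecF_getElem? (cs : List Char) (m j : Nat) :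
    (pvSpecF cs m)[j]? =
      if j < cs.length then some (if pvKeepUpto cs m j then cs.getD j 'N' else 'N') else none := by
  unfold pvSpecF
  rcases Nat.lt_or_ge j cs.length with hj | hj
  · rw [if_pos hj]
    simp [List.getElem?_map, List.getElem?_range hj]
  · rw [if_neg (by omega)]
    simp only [List.getElem?_map]
    rw [List.getElem?_eq_none (by simpa using hj)]
    rfl

-- A's loop step at index m, when the motif c d is present at m
lemma pvSpecF_set (cs : List Char) (m : Nat) (c d : Char)
    (hm : pvMot cs m = true) (hc : cs[m]? = some c) (hd : cs[m + 1]? = some d) :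
    ((pvSpecF cs m).set m c).set (m + 1) d = pvSpecF cs (m + 1) := by
  have hn : m + 1 < cs.length := pvMot_lt hm
  have hlen : (pvSpecF cs m).length = cs.length := by simp [pvSpecF]
  apply List.ext_getElem?
  intro j
  rw [List.getElem?_set, List.getElem?_set]
  simp only [List.length_set, hlen]
  rw [pvSpecF_getElem?, pvSpecF_getElem?]
  by_cases h1 : m + 1 = j
  · subst h1
    rw [if_pos rfl, if_pos hn, if_pos hn]
    have hk : pvKeepUpto cs (m + 1) (m + 1) = true := by
      simp [pvKeepUpto, hm]
    rw [hk]
    simp [List.getD_eq_getElem?_getD, hd]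
  · by_cases h0 : m = j
    · subst h0
      rw [if_neg h1, if_pos rfl, if_pos (by omega), if_pos (by omega)]
      have hk : pvKeepUpto cs (m + 1) m = true := by
        simp [pvKeepUpto, hm]
      rw [hk]
      simp [List.getD_eq_getElem?_getD, hc]
    · rw [if_neg h1, if_neg h0]
      have hk : pvKeepUpto cs (m + 1) j = pvKeepUpto cs m j := by
        unfold pvKeepUpto
        have e1 : decide (j < m + 1) = decide (j < m) := by
          simp only [decide_eq_decide]; omega
        have e2 : decide (j - 1 < m + 1) = decide (j - 1 < m) := by
          simp only [decide_eq_decide]; omega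
        rw [e1, e2]
      rw [hk]

-- A's loop step at index m, when no motif starts at m
lemma pvSpecF_stall (cs : List Char) (m : Nat) (hm : pvMot cs m = false) :
    pvSpecF cs m = pvSpecF cs (m + 1) := by
  unfold pvSpecF
  apply List.map_congr_left
  intro j _
  have hk : pvKeepUpto cs m j = pvKeepUpto cs (m + 1) j := by
    unfold pvKeepUpto
    by_cases h0 : j = m
    · subst h0
      simp only [hm, Bool.false_and, Bool.false_or]
      by_cases hz : j = 0
      · subst hz; simp
      · have e : decide (j - 1 < j) = decide (j - 1 < j + 1) := by
          simp only [decide_eq_decide]; omega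
        rw [e]
    · by_cases h1 : j = m + 1
      · subst h1
        simp [hm]
      · have e1 : decide (j < m + 1) = decide (j < m) := by
          simp only [decide_eq_decide]; omega
        have e2 : decide (j - 1 < m + 1) = decide (j - 1 < m) := by
          simp only [decide_eq_decide]; omega
        rw [e1, e2]
  rw [hk]

lemma pvA_loop (cs : List Char) (m : Nat) :
    (PySem.List.pyRange 0 (m : Int) 1).foldl
      (fun (ap : List Char) (i : Int) =>
        if PySem.List.slice cs (some i) (some (i + 2)) = ['G', 'A'] then
          PySem.List.pySetD (PySem.List.pySetD ap i 'G') (i + 1) 'A'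
        else if PySem.List.slice cs (some i) (some (i + 2)) = ['T', 'C'] then
          PySem.List.pySetD (PySem.List.pySetD ap i 'T') (i + 1) 'C'
        else ap) (List.replicate cs.length 'N') = pvSpecF cs m := by
  induction m with
  | zero =>
    rw [Nat.cast_zero, PySem.List.pyRange_one_eq_nil le_rfl, List.foldl_nil]
    unfold pvSpecF pvKeepUpto
    simp [List.map_const']
  | succ m ih =>
    have hcast : ((m + 1 : Nat) : Int) = (m : Int) + 1 := by push_cast; ring
    rw [hcast, PySem.List.pyRange_one_succ_right (by positivity), List.foldl_append, ih,
      List.foldl_cons, List.foldl_nil]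
    have hset : ∀ (c d : Char),
        PySem.List.pySetD (PySem.List.pySetD (pvSpecF cs m) (m : Int) c) ((m : Int) + 1) d =
          ((pvSpecF cs m).set m c).set (m + 1) d := by
      intro c d
      rw [show ((m : Int) + 1) = ((m + 1 : Nat) : Int) by push_cast; ring]
      rw [PySem.List.pySetD_natCast, PySem.List.pySetD_natCast]
    by_cases hGA : cs[m]? = some 'G' ∧ cs[m + 1]? = some 'A'
    · rw [if_pos ((pv_slice_two cs m 'G' 'A').mpr hGA), hset]
      exact pvSpecF_set cs m 'G' 'A' (by simp [pvMot, hGA]) hGA.1 hGA.2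
    · rw [if_neg (fun hc => hGA ((pv_slice_two cs m 'G' 'A').mp hc))]
      by_cases hTC : cs[m]? = some 'T' ∧ cs[m + 1]? = some 'C'
      · rw [if_pos ((pv_slice_two cs m 'T' 'C').mpr hTC), hset]
        exact pvSpecF_set cs m 'T' 'C' (by simp [pvMot, hTC]) hTC.1 hTC.2
      · rw [if_neg (fun hc => hTC ((pv_slice_two cs m 'T' 'C').mp hc))]
        exact pvSpecF_stall cs m (by simp [pvMot, hGA, hTC])

lemma pvKeepUpto_last (cs : List Char) (j : Nat) :
    pvKeepUpto cs (cs.length - 1) j = pvKeep cs j := by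
  unfold pvKeepUpto pvKeep
  cases hj : pvMot cs j with
  | true =>
    have := pvMot_lt hj
    cases hj' : pvMot cs (j - 1) with
    | true => have := pvMot_lt hj'; simp; omega
    | false => simp; omega
  | false =>
    cases hj' : pvMot cs (j - 1) with
    | true => have := pvMot_lt hj'; simp; intro h0; omega
    | false => simp

lemma pvSpecF_last (cs : List Char) : pvSpecF cs (cs.length - 1) = pvSpecG cs := by
  unfold pvSpecF pvSpecG
  exact List.map_congr_left fun j _ => by rw [pvKeepUpto_last]

lemma pvMaskA_eq (seq : String) : pvMaskA seq = String.ofList (pvSpecG seq.toList) := by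
  unfold pvMaskA
  dsimp only
  rcases hn : seq.toList.length with _ | k
  · rw [show (((0 : Nat) : Int) - 1) = -1 by norm_num,
      PySem.List.pyRange_one_eq_nil (by norm_num), List.foldl_nil]
    have hcs : seq.toList = [] := List.length_eq_zero_iff.mp hn
    rw [hcs]
    simp [pvSpecG]
  · rw [show (((k + 1 : Nat) : Int) - 1) = (k : Int) by push_cast; ring]
    have h2 := pvA_loop seq.toList k
    rw [hn] at h2
    rw [h2, show k = seq.toList.length - 1 by omega, pvSpecF_last]

lemma pvFindGATC_mem (cs : List Char) (i : Nat) :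
    ∀ j, j ∈ pvFindGATC cs i ↔ ∃ k, pvMot cs k = true ∧ j = i + k := by
  induction cs, i using pvFindGATC.induct with
  | case1 x y rest i h ih =>
    have mot0 : pvMot (x :: y :: rest) 0 = true := by
      rcases h with ⟨rfl, rfl⟩ | ⟨rfl, rfl⟩ <;> simp [pvMot]
    have mot1 : pvMot (x :: y :: rest) 1 = false := by
      rcases h with ⟨rfl, rfl⟩ | ⟨rfl, rfl⟩ <;> simp [pvMot]
    have motss : ∀ k, pvMot (x :: y :: rest) (k + 2) = pvMot rest k := fun k => by
      simp [pvMot]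
    intro j
    simp only [pvFindGATC, if_pos h, List.mem_cons]
    constructor
    · rintro (rfl | hj)
      · exact ⟨0, mot0, by omega⟩
      · obtain ⟨k, hk, rfl⟩ := (ih j).mp hj
        exact ⟨k + 2, by rw [motss]; exact hk, by omega⟩
    · rintro ⟨k, hk, rfl⟩
      match k with
      | 0 => exact Or.inl (by omega)
      | 1 => rw [mot1] at hk; cases hk
      | (k + 2) => exact Or.inr ((ih _).mpr ⟨k, by rwa [motss] at hk, by omega⟩)
  | case2 x y rest i h ih =>
    have mot0 : pvMot (x :: y :: rest) 0 = false := by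
      simp only [pvMot, List.getElem?_cons_zero, List.getElem?_cons_succ,
        Option.some.injEq, Bool.or_eq_false_iff, decide_eq_false_iff_not]
      tauto
    have mots : ∀ k, pvMot (x :: y :: rest) (k + 1) = pvMot (y :: rest) k := fun k => by
      simp [pvMot]
    intro j
    simp only [pvFindGATC, if_neg h]
    constructor
    · intro hj
      obtain ⟨k, hk, rfl⟩ := (ih j).mp hj
      exact ⟨k + 1, by rw [mots]; exact hk, by omega⟩
    · rintro ⟨k, hk, rfl⟩
      match k with
      | 0 => rw [mot0] at hk; cases hk
      | (k + 1) => exact (ih _).mpr ⟨k, by rwa [mots] at hk, by omega⟩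
  | case3 t i hne =>
    rcases t with _ | ⟨x, _ | ⟨y, rest⟩⟩
    · intro j; simp [pvFindGATC, pvMot]
    · intro j; simp [pvFindGATC, pvMot]
    · exact (hne x y rest rfl).elim

lemma pvSpecG_getElem? (cs : List Char) (j : Nat) :
    (pvSpecG cs)[j]? =
      if j < cs.length then some (if pvKeep cs j then cs.getD j 'N' else 'N') else none := by
  unfold pvSpecG
  rcases Nat.lt_or_ge j cs.length with hj | hj
  · rw [if_pos hj]
    simp [List.getElem?_map, List.getElem?_range hj]
  · rw [if_neg (by omega)]
    simp only [List.getElem?_map]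
    rw [List.getElem?_eq_none (by simpa using hj)]
    rfl

lemma pvB_fold (cs : List Char) (L : List Nat) (h : ∀ i ∈ L, i + 1 < cs.length)
    (acc : List Char) (hlen : acc.length = cs.length) (j : Nat) :
    (L.foldl (fun (m : List Char) (i : Nat) =>
        (m.set i (cs.getD i 'N')).set (i + 1) (cs.getD (i + 1) 'N')) acc)[j]? =
      if ∃ i ∈ L, j = i ∨ j = i + 1 then some (cs.getD j 'N') else acc[j]? := by
  induction L generalizing acc with
  | nil => simp
  | cons i0 L ih =>
    have hi0 : i0 + 1 < cs.length := h i0 (by simp)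
    have hstep : ((acc.set i0 (cs.getD i0 'N')).set (i0 + 1) (cs.getD (i0 + 1) 'N'))[j]? =
        if j = i0 ∨ j = i0 + 1 then some (cs.getD j 'N') else acc[j]? := by
      rw [List.getElem?_set, List.getElem?_set]
      simp only [List.length_set, hlen]
      by_cases h1 : i0 + 1 = j
      · subst h1; simp [hi0]
      · by_cases h0 : i0 = j
        · subst h0; simp [Nat.lt_of_succ_lt hi0]
        · simp [h0, h1]
          intro hc
          exact absurd hc.symm (by omega)
    rw [List.foldl_cons, ih (fun i hi => h i (by simp [hi]))
        ((acc.set i0 (cs.getD i0 'N')).set (i0 + 1) (cs.getD (i0 + 1) 'N'))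
        (by simp [List.length_set, hlen])]
    by_cases hL : ∃ i ∈ L, j = i ∨ j = i + 1
    · rw [if_pos hL, if_pos ⟨hL.choose, by simp [hL.choose_spec.1], hL.choose_spec.2⟩]
    · rw [if_neg hL, hstep]
      by_cases hj : j = i0 ∨ j = i0 + 1
      · rw [if_pos hj, if_pos ⟨i0, by simp, hj⟩]
      · rw [if_neg hj, if_neg (by
          rintro ⟨i, hi, hji⟩
          rcases List.mem_cons.mp hi with rfl | hi
          · exact hj hji
          · exact hL ⟨i, hi, hji⟩)]

lemma pvMaskB_eq (seq : String) : pvMaskB seq = String.ofList (pvSpecG seq.toList) := by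
  unfold pvMaskB
  dsimp only
  congr 1
  have hmem : ∀ i ∈ pvFindGATC seq.toList 0, i + 1 < seq.toList.length := by
    intro i hi
    obtain ⟨k, hk, rfl⟩ := (pvFindGATC_mem seq.toList 0 i).mp hi
    simpa using pvMot_lt hk
  apply List.ext_getElem?
  intro j
  rw [pvB_fold seq.toList _ hmem _ (by simp) j]
  have hcond : (∃ i ∈ pvFindGATC seq.toList 0, j = i ∨ j = i + 1) ↔ pvKeep seq.toList j = true := by
    constructor
    · rintro ⟨i, hi, hj⟩
      obtain ⟨k, hk, rfl⟩ := (pvFindGATC_mem seq.toList 0 i).mp hi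
      rw [Nat.zero_add] at hj
      unfold pvKeep
      rcases hj with rfl | rfl
      · rw [hk]; simp
      · rw [Nat.add_sub_cancel, hk]
        simp
    · intro hkp
      by_cases hm : pvMot seq.toList j = true
      · exact ⟨j, (pvFindGATC_mem seq.toList 0 j).mpr ⟨j, hm, (Nat.zero_add j).symm⟩, Or.inl rfl⟩
      · have hj2 : 0 < j ∧ pvMot seq.toList (j - 1) = true := by
          unfold pvKeep at hkp
          rcases (Bool.or_eq_true _ _).mp hkp with h | h
          · exact absurd h hm
          · simpa using h
        exact ⟨j - 1, (pvFindGATC_mem seq.toList 0 (j - 1)).mpr ⟨j - 1, hj2.2, (Nat.zero_add _).symm⟩,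
          Or.inr (by omega)⟩
  by_cases hkp : pvKeep seq.toList j = true
  · rw [if_pos (hcond.mpr hkp)]
    have hjn : j < seq.toList.length := by
      unfold pvKeep at hkp
      by_cases hm : pvMot seq.toList j = true
      · exact Nat.lt_of_succ_lt (pvMot_lt hm)
      · have h2 : 0 < j ∧ pvMot seq.toList (j - 1) = true := by
          rcases (Bool.or_eq_true _ _).mp hkp with h | h
          · exact absurd h hm
          · simpa using h
        have := pvMot_lt h2.2
        omega
    rw [pvSpecG_getElem?, if_pos hjn, hkp]
    simp
  · rw [if_neg (fun hc => hkp (hcond.mp hc)), List.getElem?_replicate, pvSpecG_getElem?]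
    rcases Nat.lt_or_ge j seq.toList.length with hj | hj
    · rw [if_pos hj, if_pos hj]
      simp [hkp]
    · rw [if_neg (by omega), if_neg (by omega)]

-- ===== VERDICT (by name: the statement is the Claim_ definition above) =====
theorem create_initial_apobec_partition_spec : Claim_equal_create_initial_apobec_partition := by
  intro sequences _
  unfold Spec_create_initial_apobec_partition
  unfold create_initial_apobec_partition create_initial_apobec_partition_alt
  rw [PySem.List.foldl_append_singleton_eq_map]
  exact List.map_congr_left fun s _ => ((pvMaskA_eq s).trans (pvMaskB_eq s).symm)
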